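-- pv_equiv track=rewrite | github.com/shuvo87sa/CSE-406-OS-LAB | C_SCAN_Disk_Scheduling.py | cscan_disk
-- ===== SOURCE A (Python) =====
-- def cscan_disk(request_list, initial_head, max_cylinder=200):
--     # Sort the request queue
--     sorted_requests = sorted(request_list)
--     seek_count = 0
--     current = initial_head
--
--     # Split requests into two halves based on head position
--     upward = [req for req in sorted_requests if req >= current]
--     downward = [req for req in sorted_requests if req < current]
--
--     # Move towards the end (higher tracks)
--     for req in upward:
--         seek_count += abs(current - req)
--         current = req
--
--     # Jump from end to start
--     seek_count += (max_cylinder - 1 - current) + (max_cylinder - 1)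
--     current = 0
--
--     # Continue servicing the lower half
--     for req in downward:
--         seek_count += abs(current - req)
--         current = req
--
--     return seek_count
-- ===== SOURCE B (Python) =====
-- def cscan_disk(request_list, initial_head, max_cylinder=200):
--     # One pass: max of the upward set, min/max of the downward set; closed-form
--     # telescoping sums replace the sort and the two scan loops.
--     max_up = None
--     min_dn = None
--     max_dn = None
--     for r in request_list:
--         if r >= initial_head:
--             if max_up is None or r > max_up:
--                 max_up = r
--         else:
--             if min_dn is None or r < min_dn:
--                 min_dn = r
--             if max_dn is None or r > max_dn:
--                 max_dn = r
--     peak = initial_head if max_up is None else max_up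
--     total = (peak - initial_head) + (max_cylinder - 1 - peak) + (max_cylinder - 1)
--     if min_dn is not None:
--         total += abs(min_dn) + (max_dn - min_dn)
--     return total
-- ===== Notes on version B (the rewrite author's own statement) =====
-- stated objective: faster
-- what changed: Replaced A's sort plus two sequential seek loops by a single pass computing the maximum of the upward requests and the min/max of the downward requests, then closed-form telescoping sums for both sweeps.
import Mathlib
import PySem

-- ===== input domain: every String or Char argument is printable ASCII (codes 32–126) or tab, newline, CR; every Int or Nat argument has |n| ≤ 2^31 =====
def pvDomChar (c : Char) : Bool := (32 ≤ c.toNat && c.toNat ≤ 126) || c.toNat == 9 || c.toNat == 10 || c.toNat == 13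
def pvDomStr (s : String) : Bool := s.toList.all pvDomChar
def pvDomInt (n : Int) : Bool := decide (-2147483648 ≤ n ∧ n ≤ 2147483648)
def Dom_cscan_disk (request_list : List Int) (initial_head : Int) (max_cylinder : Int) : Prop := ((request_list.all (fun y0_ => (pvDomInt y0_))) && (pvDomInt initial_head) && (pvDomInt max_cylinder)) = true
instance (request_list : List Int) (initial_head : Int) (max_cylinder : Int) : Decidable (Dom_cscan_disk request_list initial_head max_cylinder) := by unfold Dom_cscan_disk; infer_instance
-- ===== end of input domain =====

-- B replaces A's sort plus two scan loops by a single pass (max of the upward set,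
-- min/max of the downward set) and closed-form telescoping sums; objective: faster.

-- ===== PORT A =====
def cscan_disk (request_list : List Int) (initial_head : Int) (max_cylinder : Int) : Int :=
  let sorted_requests := PySem.List.sorted request_list (fun x => x) false
  let current := initial_head
  let upward := sorted_requests.filter (fun req => current ≤ req)
  let downward := sorted_requests.filter (fun req => req < current)
  -- for req in upward: seek_count += abs(current - req); current = req
  let st1 := upward.foldl (fun (p : Int × Int) req => (p.1 + |p.2 - req|, req)) ((0 : Int), current)
  -- seek_count += (max_cylinder - 1 - current) + (max_cylinder - 1); current = 0
  let st2 := (st1.1 + (max_cylinder - 1 - st1.2) + (max_cylinder - 1), (0 : Int))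
  -- for req in downward: seek_count += abs(current - req); current = req
  let st3 := downward.foldl (fun (p : Int × Int) req => (p.1 + |p.2 - req|, req)) st2
  st3.1

-- ===== PORT B =====
-- running maximum / minimum over an Option accumulator (None = not seen yet)
def pvOMax (o : Option Int) (r : Int) : Option Int :=
  match o with | none => some r | some m => if m < r then some r else some m
def pvOMin (o : Option Int) (r : Int) : Option Int :=
  match o with | none => some r | some m => if r < m then some r else some m

def pvBStep (initial_head : Int) (s : Option Int × Option Int × Option Int) (r : Int) :
    Option Int × Option Int × Option Int :=
  if initial_head ≤ r then (pvOMax s.1 r, s.2.1, s.2.2)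
  else (s.1, pvOMin s.2.1 r, pvOMax s.2.2 r)

def cscan_disk_alt (request_list : List Int) (initial_head : Int) (max_cylinder : Int) : Int :=
  let st := request_list.foldl (pvBStep initial_head) (none, none, none)
  let peak := match st.1 with | none => initial_head | some m => m
  let total := (peak - initial_head) + (max_cylinder - 1 - peak) + (max_cylinder - 1)
  match st.2.1, st.2.2 with
  | some mn, some mx => total + (|mn| + (mx - mn))
  | _, _ => total

-- ===== PRECONDITION & SPEC =====
def Spec_cscan_disk (request_list : List Int) (initial_head : Int) (max_cylinder : Int) (out : Int) : Prop := out = cscan_disk_alt request_list initial_head max_cylinder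
instance (request_list : List Int) (initial_head : Int) (max_cylinder : Int) (out : Int) : Decidable (Spec_cscan_disk request_list initial_head max_cylinder out) := by unfold Spec_cscan_disk; infer_instance

-- ===== CLAIM (what is proved, stated in full; the proofs are below) =====
def Claim_equal_cscan_disk : Prop := ∀ (request_list : List Int) (initial_head : Int) (max_cylinder : Int), Dom_cscan_disk request_list initial_head max_cylinder → Spec_cscan_disk request_list initial_head max_cylinder (cscan_disk request_list initial_head max_cylinder)

-- ===== LEMMAS AND PROOFS =====

-- A's seek loop telescopes on a sorted (Pairwise ≤) nonempty list.
lemma pv_tele (t : List Int) : ∀ (x a c : Int), (x :: t).Pairwise (· ≤ ·) →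
    (x :: t).foldl (fun (p : Int × Int) req => (p.1 + |p.2 - req|, req)) (a, c)
      = (a + |c - x| + ((x :: t).getLast (by simp) - x), (x :: t).getLast (by simp)) := by
  induction t with
  | nil => intro x a c _; simp
  | cons y t ih =>
    intro x a c hp
    have hxy : x ≤ y := (List.pairwise_cons.mp hp).1 y (by simp)
    have hp' : (y :: t).Pairwise (· ≤ ·) := (List.pairwise_cons.mp hp).2
    have hih := ih y (a + |c - x|) x hp'
    simp only [List.foldl_cons] at hih ⊢
    rw [hih]
    have hgl : (x :: y :: t).getLast (by simp) = (y :: t).getLast (by simp) :=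
      List.getLast_cons (by simp)
    have hax : |x - y| = y - x := by
      rw [abs_sub_comm]; exact abs_of_nonneg (by omega)
    rw [hgl, hax, Prod.mk.injEq]
    exact ⟨by ring, rfl⟩

-- every element of a Pairwise-≤ cons list is ≤ its getLast
lemma pv_le_getLast (t : List Int) : ∀ x, (x :: t).Pairwise (· ≤ ·) →
    ∀ y ∈ x :: t, y ≤ (x :: t).getLast (by simp) := by
  induction t with
  | nil => intro x _ y hy; simp at hy; simp [hy]
  | cons z t ih =>
    intro x hp y hy
    have hxz : x ≤ z := (List.pairwise_cons.mp hp).1 z (by simp)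
    have hp' : (z :: t).Pairwise (· ≤ ·) := (List.pairwise_cons.mp hp).2
    have hgl : (x :: z :: t).getLast (by simp) = (z :: t).getLast (by simp) :=
      List.getLast_cons (by simp)
    rw [hgl]
    rcases List.mem_cons.mp hy with h | h
    · subst h
      exact le_trans hxz (ih z hp' z (by simp))
    · exact ih z hp' y h

-- the head of a Pairwise-≤ cons list is ≤ every element
lemma pv_head_le (x : Int) (t : List Int) (hp : (x :: t).Pairwise (· ≤ ·)) :
    ∀ y ∈ x :: t, x ≤ y := by
  intro y hy
  rcases List.mem_cons.mp hy with h | h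
  · omega
  · exact (List.pairwise_cons.mp hp).1 y h

-- B's option-max/min folds are Some of the plain max/min folds
lemma pv_foldl_omax (L : List Int) : ∀ c, L.foldl pvOMax (some c) = some (L.foldl max c) := by
  induction L with
  | nil => intro c; rfl
  | cons r L ih =>
    intro c
    have hstep : pvOMax (some c) r = some (max c r) := by
      simp only [pvOMax]
      rcases (by omega : r ≤ c ∨ c < r) with hrc | hrc
      · rw [if_neg (by omega), max_eq_left hrc]
      · rw [if_pos hrc, max_eq_right (by omega)]
    simp only [List.foldl_cons, hstep, ih]
lemma pv_foldl_omin (L : List Int) : ∀ c, L.foldl pvOMin (some c) = some (L.foldl min c) := by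
  induction L with
  | nil => intro c; rfl
  | cons r L ih =>
    intro c
    have hstep : pvOMin (some c) r = some (min c r) := by
      simp only [pvOMin]
      rcases (by omega : c ≤ r ∨ r < c) with hrc | hrc
      · rw [if_neg (by omega), min_eq_left hrc]
      · rw [if_pos hrc, min_eq_right (by omega)]
    simp only [List.foldl_cons, hstep, ih]

-- B's single pass computes the three option-folds over the two filtered sublists
lemma pv_bfold (h : Int) (L : List Int) : ∀ (u n x : Option Int),
    L.foldl (pvBStep h) (u, n, x)
      = ((L.filter (fun r => h ≤ r)).foldl pvOMax u,
         (L.filter (fun r => r < h)).foldl pvOMin n,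
         (L.filter (fun r => r < h)).foldl pvOMax x) := by
  induction L with
  | nil => intro u n x; rfl
  | cons r L ih =>
    intro u n x
    by_cases hr : h ≤ r
    · have h2 : ¬ r < h := by omega
      simp [pvBStep, hr, h2, ih]
    · have h2 : r < h := by omega
      simp [pvBStep, hr, h2, ih]

-- foldl max is an upper bound and a member; foldl min dually
lemma pv_foldl_max_ub (L : List Int) (c y : Int) (hy : y ∈ c :: L) : y ≤ L.foldl max c := by
  have h := (List.max?_le_iff (xs := c :: L) (x := L.foldl max c) rfl (a := L.foldl max c)).mp le_rfl
  exact h y hy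
lemma pv_foldl_max_mem (L : List Int) (c : Int) : L.foldl max c ∈ c :: L :=
  List.max?_mem (xs := c :: L) rfl
lemma pv_foldl_min_lb (L : List Int) (c y : Int) (hy : y ∈ c :: L) : L.foldl min c ≤ y := by
  have h := (List.le_min?_iff (xs := c :: L) (x := L.foldl min c) rfl (a := L.foldl min c)).mp le_rfl
  exact h y hy
lemma pv_foldl_min_mem (L : List Int) (c : Int) : L.foldl min c ∈ c :: L :=
  List.min?_mem (xs := c :: L) rfl

-- A's upward loop vs B's upward maximum (UA = A's sorted filtered list, UB = B's raw filtered list)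
lemma pv_up (UA UB : List Int) (h acc : Int)
    (hp : UA.Pairwise (· ≤ ·)) (hmem : ∀ y, y ∈ UA ↔ y ∈ UB) (hge : ∀ y ∈ UA, h ≤ y) :
    UA.foldl (fun (p : Int × Int) req => (p.1 + |p.2 - req|, req)) (acc, h)
      = (acc + ((match UB.foldl pvOMax none with | none => h | some m => m) - h),
         (match UB.foldl pvOMax none with | none => h | some m => m)) := by
  cases UA with
  | nil =>
    cases UB with
    | nil => simp
    | cons b bs => exact absurd ((hmem b).mpr ((List.mem_cons_self : b ∈ b :: bs))) (by simp)
  | cons a as_ =>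
    cases UB with
    | nil => exact absurd ((hmem a).mp ((List.mem_cons_self : a ∈ a :: as_))) (by simp)
    | cons b bs =>
      rw [List.foldl_cons (f := pvOMax), show pvOMax none b = some b from rfl, pv_foldl_omax]
      rw [pv_tele as_ a acc h hp]
      have hlast : bs.foldl max b = (a :: as_).getLast (by simp) := by
        apply le_antisymm
        · exact pv_le_getLast as_ a hp _ ((hmem _).mpr (pv_foldl_max_mem bs b))
        · exact pv_foldl_max_ub bs b _ ((hmem _).mp (List.getLast_mem (by simp)))
      have hha : h ≤ a := hge a ((List.mem_cons_self : a ∈ a :: as_))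
      have habs : |h - a| = a - h := by rw [abs_sub_comm]; exact abs_of_nonneg (by omega)
      rw [habs, hlast, Prod.mk.injEq]
      exact ⟨by ring, rfl⟩

-- A's downward loop vs B's downward min/max
lemma pv_down (DA DB : List Int) (s2 : Int)
    (hp : DA.Pairwise (· ≤ ·)) (hmem : ∀ y, y ∈ DA ↔ y ∈ DB) :
    (DA.foldl (fun (p : Int × Int) req => (p.1 + |p.2 - req|, req)) (s2, 0)).1
      = (match DB.foldl pvOMin none, DB.foldl pvOMax none with
         | some mn, some mx => s2 + (|mn| + (mx - mn))
         | _, _ => s2) := by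
  cases DA with
  | nil =>
    cases DB with
    | nil => simp
    | cons b bs => exact absurd ((hmem b).mpr ((List.mem_cons_self : b ∈ b :: bs))) (by simp)
  | cons a as_ =>
    cases DB with
    | nil => exact absurd ((hmem a).mp ((List.mem_cons_self : a ∈ a :: as_))) (by simp)
    | cons b bs =>
      rw [List.foldl_cons (f := pvOMin), List.foldl_cons (f := pvOMax),
          show pvOMin none b = some b from rfl, show pvOMax none b = some b from rfl,
          pv_foldl_omin, pv_foldl_omax]
      rw [pv_tele as_ a s2 0 hp]
      have hmin : bs.foldl min b = a := by
        apply le_antisymm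
        · exact pv_foldl_min_lb bs b _ ((hmem _).mp ((List.mem_cons_self : a ∈ a :: as_)))
        · exact pv_head_le a as_ hp _ ((hmem _).mpr (pv_foldl_min_mem bs b))
      have hmax : bs.foldl max b = (a :: as_).getLast (by simp) := by
        apply le_antisymm
        · exact pv_le_getLast as_ a hp _ ((hmem _).mpr (pv_foldl_max_mem bs b))
        · exact pv_foldl_max_ub bs b _ ((hmem _).mp (List.getLast_mem (by simp)))
      have habs : |(0 : Int) - a| = |a| := by rw [zero_sub, abs_neg]
      simp only [hmin, hmax, habs]
      ring_nf

-- the filtered sorted list and the filtered raw list have the same members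
lemma pv_mem_filter_sorted (rl : List Int) (p : Int → Bool) (y : Int) :
    y ∈ (PySem.List.sorted rl (fun x => x) false).filter p ↔ y ∈ rl.filter p := by
  simp [List.mem_filter, PySem.List.mem_sorted]

theorem cscan_disk_spec_aux (rl : List Int) (h mc : Int) :
    cscan_disk rl h mc = cscan_disk_alt rl h mc := by
  simp only [cscan_disk, cscan_disk_alt]
  rw [pv_bfold]
  have hSp : (PySem.List.sorted rl (fun x => x) false).Pairwise (· ≤ ·) := by
    have := PySem.List.sorted_pairwise (xs := rl) (key := fun x => x)
    simpa using this
  have hUp : ((PySem.List.sorted rl (fun x => x) false).filter (fun req => h ≤ req)).Pairwise (· ≤ ·) :=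
    List.Pairwise.filter _ hSp
  have hDp : ((PySem.List.sorted rl (fun x => x) false).filter (fun req => req < h)).Pairwise (· ≤ ·) :=
    List.Pairwise.filter _ hSp
  have hge : ∀ y ∈ (PySem.List.sorted rl (fun x => x) false).filter (fun req => h ≤ req), h ≤ y := by
    intro y hy
    have := (List.mem_filter.mp hy).2
    simpa using this
  rw [pv_up _ (rl.filter (fun r => h ≤ r)) h 0 hUp (pv_mem_filter_sorted rl _) hge]
  rw [pv_down _ (rl.filter (fun r => r < h)) _ hDp (pv_mem_filter_sorted rl _)]
  cases (rl.filter (fun r => h ≤ r)).foldl pvOMax none <;>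
    cases (rl.filter (fun r => r < h)).foldl pvOMin none <;>
    cases (rl.filter (fun r => r < h)).foldl pvOMax none <;>
    simp

-- ===== VERDICT (by name: the statement is the Claim_ definition above) =====
theorem cscan_disk_spec : Claim_equal_cscan_disk := by
  intro rl h mc _
  show _ = _
  exact cscan_disk_spec_aux rl h mc
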